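-- pv_equiv track=rewrite | github.com/inaciovasquez2020/bepty | tools/search_equal_package_nonrecoverability.py | all_graphs
-- ===== SOURCE A (Python) =====
-- def canonical_edge(u: int, v: int) -> tuple[int, int]:
--     return (u, v) if u < v else (v, u)
--
-- def all_graphs(n: int):
--     verts = list(range(n))
--     all_edges = [canonical_edge(i, j) for i in range(n) for j in range(i + 1, n)]
--     for mask in range(1 << len(all_edges)):
--         E = set()
--         for k, e in enumerate(all_edges):
--             if (mask >> k) & 1:
--                 E.add(e)
--         yield verts, E
-- ===== SOURCE B (Python) =====
-- def all_graphs(n: int):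
--     # Iterative subset-doubling instead of A's integer-mask loop:
--     # after processing edge e, the subset list doubles, appending e to each copy,
--     # which reproduces binary-counting (mask 0,1,2,...) order exactly.
--     verts = list(range(n))
--     edges = [(i, j) for i in range(n) for j in range(i + 1, n)]
--     subsets = [[]]
--     for e in edges:
--         subsets = subsets + [s + [e] for s in subsets]
--     for s in subsets:
--         yield verts, set(s)
-- ===== Notes on version B (the rewrite author's own statement) =====
-- stated objective: alternative
-- what changed: Replaces the 2^m-iteration integer-mask loop with a bit-test per edge by an iterative subset-doubling build (subsets = subsets + [s+[e] for s in subsets] per edge), which reproduces binary-counting order without any bit arithmetic.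
import Mathlib
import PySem

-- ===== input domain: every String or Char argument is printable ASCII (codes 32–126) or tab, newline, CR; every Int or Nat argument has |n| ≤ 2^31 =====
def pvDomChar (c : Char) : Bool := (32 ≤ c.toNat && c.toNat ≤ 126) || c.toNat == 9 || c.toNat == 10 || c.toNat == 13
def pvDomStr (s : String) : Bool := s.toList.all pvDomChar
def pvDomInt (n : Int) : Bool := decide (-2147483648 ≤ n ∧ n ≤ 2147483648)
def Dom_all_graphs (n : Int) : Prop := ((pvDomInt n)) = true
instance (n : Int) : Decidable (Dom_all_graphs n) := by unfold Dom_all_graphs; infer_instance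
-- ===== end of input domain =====

-- B replaces A's integer-mask loop by an iterative subset-doubling build of the same
-- power set in the same (binary-counting) order; alternative decomposition, not faster.

-- ===== PORT A =====
def canonical_edge (u : Int) (v : Int) : Int × Int := if u < v then (u, v) else (v, u)

def all_graphs (n : Int) : List (List Int × (List (Int × Int))) :=
  let verts := PySem.List.pyRange 0 n 1
  let all_edges := (PySem.List.pyRange 0 n 1).flatMap
    (fun i => (PySem.List.pyRange (i + 1) n 1).map (fun j => canonical_edge i j))
  -- 'for mask in range(1 << len(all_edges))': every mask is a nonnegative int, so the loop
  -- is iterated over the same values as Nats; '(mask >> k) & 1' is exactly Nat.testBit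
  -- (the index k from enumerate is ≥ 0, so .toNat is exact).
  (List.range (2 ^ all_edges.length)).map (fun mask =>
    (verts,
      (PySem.List.enumerate all_edges).foldl
        (fun E ke => if mask.testBit ke.1.toNat then PySem.Set.add E ke.2 else E)
        PySem.Set.empty))

-- ===== PORT B =====
def all_graphs_alt (n : Int) : List (List Int × (List (Int × Int))) :=
  let verts := PySem.List.pyRange 0 n 1
  let edges := (PySem.List.pyRange 0 n 1).flatMap
    (fun i => (PySem.List.pyRange (i + 1) n 1).map (fun j => (i, j)))
  let subsets := edges.foldl (fun acc e => acc ++ acc.map (fun s => s ++ [e])) [[]]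
  subsets.map (fun s => (verts, PySem.Set.ofList s))

-- ===== PRECONDITION & SPEC =====
def Spec_all_graphs (n : Int) (out : List (List Int × (List (Int × Int)))) : Prop := out = all_graphs_alt n
instance (n : Int) (out : List (List Int × (List (Int × Int)))) : Decidable (Spec_all_graphs n out) := by unfold Spec_all_graphs; infer_instance

-- ===== CLAIM (what is proved, stated in full; the proofs are below) =====
def Claim_equal_all_graphs : Prop := ∀ (n : Int), Dom_all_graphs n → Spec_all_graphs n (all_graphs n)

-- ===== LEMMAS AND PROOFS =====

-- A's inner loop, abstracted over the enumerated list and the accumulator.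
def maskFold (mask : Nat) (l : List (Int × (Int × Int))) (E : List (Int × Int)) : List (Int × Int) :=
  l.foldl (fun E ke => if mask.testBit ke.1.toNat then PySem.Set.add E ke.2 else E) E

theorem maskFold_singleton (mask : Nat) (a : Int × (Int × Int)) (E : List (Int × Int)) :
    maskFold mask [a] E = if mask.testBit a.1.toNat then PySem.Set.add E a.2 else E := rfl

theorem maskFold_append (mask : Nat) (l₁ l₂ : List (Int × (Int × Int))) (E : List (Int × Int)) :
    maskFold mask (l₁ ++ l₂) E = maskFold mask l₂ (maskFold mask l₁ E) := by
  simp [maskFold]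

theorem mem_maskFold (mask : Nat) (l : List (Int × (Int × Int))) (E : List (Int × Int))
    (x : Int × Int) (hx : x ∈ maskFold mask l E) : x ∈ E ∨ x ∈ l.map (·.2) := by
  induction l generalizing E with
  | nil => simpa [maskFold] using hx
  | cons a l ih =>
    simp only [maskFold, List.foldl_cons] at hx
    rcases ih _ hx with h | h
    · by_cases hb : mask.testBit a.1.toNat
      · simp only [hb, if_pos] at h
        rcases (PySem.Set.mem_add _ _ _).1 h with h' | h'
        · exact Or.inl h'
        · exact Or.inr (by simp [h'])
      · simp only [hb] at h
        exact Or.inl h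
    · exact Or.inr (by simp; right; simpa using h)

theorem maskFold_congr (a b m : Nat) (l : List (Int × (Int × Int))) (E : List (Int × Int))
    (hl : ∀ ke ∈ l, ke.1.toNat < m) (hb : ∀ j < m, a.testBit j = b.testBit j) :
    maskFold a l E = maskFold b l E := by
  induction l generalizing E with
  | nil => rfl
  | cons ke l ih =>
    simp only [maskFold, List.foldl_cons]
    rw [hb _ (hl ke (by simp))]
    exact ih _ (fun x hx => hl x (by simp [hx]))

theorem testBit_two_pow_add_self (m k : Nat) (hk : k < 2 ^ m) :
    (2 ^ m + k).testBit m = true := by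
  rw [Nat.testBit_eq_decide_div_mod_eq]
  have h1 : (2 ^ m + k) / 2 ^ m = 1 := by
    rw [Nat.add_div_left _ (Nat.pow_pos (by norm_num)), Nat.div_eq_of_lt hk]
  simp [h1]

theorem testBit_two_pow_add_lt (m k j : Nat) (hj : j < m) :
    (2 ^ m + k).testBit j = k.testBit j := by
  rw [Nat.testBit_eq_decide_div_mod_eq, Nat.testBit_eq_decide_div_mod_eq]
  have h2 : 2 ^ m = 2 ^ j * (2 * 2 ^ (m - j - 1)) := by
    rw [← pow_succ']
    rw [← pow_add]
    congr 1
    omega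
  rw [h2, Nat.add_comm,
    Nat.add_mul_div_left _ _ (Nat.pow_pos (a := 2) (n := j) (by norm_num)),
    Nat.add_mul_mod_self_left]

-- B's doubling loop.
def doubling (es : List (Int × Int)) : List (List (Int × Int)) :=
  es.foldl (fun acc e => acc ++ acc.map (fun s => s ++ [e])) [[]]

theorem mem_doubling_sublist (es : List (Int × Int)) (s : List (Int × Int))
    (hs : s ∈ doubling es) : s.Sublist es := by
  induction es using List.reverseRecOn generalizing s with
  | nil => simp [doubling] at hs; simp [hs]
  | append_singleton es e ih =>
    simp only [doubling, List.foldl_append, List.foldl_cons, List.foldl_nil] at hs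
    rw [List.mem_append] at hs
    rcases hs with h | h
    · exact (ih s h).trans (List.sublist_append_left _ _)
    · rcases List.mem_map.1 h with ⟨t, ht, rfl⟩
      exact (ih t ht).append (List.Sublist.refl [e])

theorem range_two_pow_maskFold (es : List (Int × Int)) (h : es.Nodup) :
    (List.range (2 ^ es.length)).map
      (fun mask => maskFold mask (PySem.List.enumerate es) PySem.Set.empty)
    = doubling es := by
  induction es using List.reverseRecOn with
  | nil => simp [doubling, maskFold, PySem.List.enumerate, PySem.Set.empty]
  | append_singleton es e ih =>
    have hnd : es.Nodup := (List.nodup_append.1 h).1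
    have hee : e ∉ es := by
      intro hmem
      exact List.disjoint_of_nodup_append h hmem (by simp)
    have hidx : ∀ ke ∈ PySem.List.enumerate es, ke.1.toNat < es.length := by
      intro ke hke
      rcases (PySem.List.mem_enumerate_iff _ _ _).1 hke with ⟨k, hk, rfl⟩
      simp; omega
    have henum : PySem.List.enumerate (es ++ [e]) =
        PySem.List.enumerate es ++ [((es.length : Int), e)] := by
      rw [PySem.List.enumerate_append]
      simp [PySem.List.enumerate_cons, PySem.List.enumerate_nil]
    have hlen : (es ++ [e]).length = es.length + 1 := by simp
    have hsplit : (2 : Nat) ^ (es.length + 1) = 2 ^ es.length + 2 ^ es.length := by ring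
    rw [hlen, hsplit, List.range_add, List.map_append, List.map_map]
    have hD : doubling (es ++ [e]) = doubling es ++ (doubling es).map (fun s => s ++ [e]) := by
      simp [doubling, List.foldl_append]
    rw [hD]
    congr 1
    · -- masks < 2^|es|: the new top bit is 0
      rw [← ih hnd]
      apply List.map_congr_left
      intro mask hmask
      rw [List.mem_range] at hmask
      rw [henum, maskFold_append]
      have h0 : mask.testBit es.length = false := Nat.testBit_eq_false_of_lt hmask
      simp [maskFold, h0]
    · -- masks 2^|es| + k: the new top bit is 1, lower bits are those of k
      rw [← ih hnd, List.map_map]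
      apply List.map_congr_left
      intro k hk
      rw [List.mem_range] at hk
      simp only [Function.comp_apply]
      rw [henum, maskFold_append]
      have htop : (2 ^ es.length + k).testBit ((es.length : Int)).toNat = true := by
        simpa using testBit_two_pow_add_self es.length k hk
      have hlow : maskFold (2 ^ es.length + k) (PySem.List.enumerate es) PySem.Set.empty
          = maskFold k (PySem.List.enumerate es) PySem.Set.empty := by
        exact maskFold_congr _ _ es.length _ _ hidx
          (fun j hj => testBit_two_pow_add_lt es.length k j hj)
      have hnotmem : e ∉ maskFold k (PySem.List.enumerate es) PySem.Set.empty := by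
        intro hmem
        rcases mem_maskFold _ _ _ _ hmem with h' | h'
        · simp [PySem.Set.empty] at h'
        · rw [PySem.List.map_snd_enumerate] at h'
          exact hee h'
      rw [hlow, maskFold_singleton, if_pos htop]
      -- Set.add of a fresh element appends it
      have hnotmem' : e ∉ maskFold k (PySem.List.enumerate es) [] := hnotmem
      simp [PySem.Set.add, PySem.Set.contains, hnotmem']

theorem edges_eq (n : Int) :
    (PySem.List.pyRange 0 n 1).flatMap
      (fun i => (PySem.List.pyRange (i + 1) n 1).map (fun j => canonical_edge i j))
    = (PySem.List.pyRange 0 n 1).flatMap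
      (fun i => (PySem.List.pyRange (i + 1) n 1).map (fun j => (i, j))) := by
  apply List.flatMap_congr
  intro i _
  apply List.map_congr_left
  intro j hj
  have := (PySem.List.mem_pyRange_one).1 hj
  simp [canonical_edge]
  omega

theorem edges_nodup (n : Int) :
    ((PySem.List.pyRange 0 n 1).flatMap
      (fun i => (PySem.List.pyRange (i + 1) n 1).map (fun j => (i, j)))).Nodup := by
  rw [List.nodup_flatMap]
  constructor
  · intro i _
    exact (PySem.List.nodup_pyRange_one _ _).map (fun a b hab => by
      simpa using hab)
  · refine (PySem.List.pairwise_lt_pyRange_one 0 n).imp ?_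
    intro i i' hlt
    simp only [Function.onFun]
    intro x hx hx'
    rcases List.mem_map.1 hx with ⟨j, _, rfl⟩
    rcases List.mem_map.1 hx' with ⟨j', _, heq⟩
    have : i' = i := by simpa using congrArg Prod.fst heq
    omega

-- ===== VERDICT (by name: the statement is the Claim_ definition above) =====
theorem all_graphs_spec : Claim_equal_all_graphs := by
  intro n _
  unfold Spec_all_graphs all_graphs all_graphs_alt
  simp only
  rw [edges_eq]
  set es := (PySem.List.pyRange 0 n 1).flatMap
      (fun i => (PySem.List.pyRange (i + 1) n 1).map (fun j => ((i : Int), (j : Int)))) with hes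
  have hnd : es.Nodup := edges_nodup n
  have hmain := range_two_pow_maskFold es hnd
  rw [show (fun mask =>
      ((PySem.List.pyRange 0 n 1),
        (PySem.List.enumerate es).foldl
          (fun E ke => if mask.testBit ke.1.toNat then PySem.Set.add E ke.2 else E)
          PySem.Set.empty)) = (fun mask =>
      ((PySem.List.pyRange 0 n 1),
        maskFold mask (PySem.List.enumerate es) PySem.Set.empty)) from rfl]
  have : (List.range (2 ^ es.length)).map (fun mask =>
      ((PySem.List.pyRange 0 n 1), maskFold mask (PySem.List.enumerate es) PySem.Set.empty))
      = (doubling es).map (fun s => ((PySem.List.pyRange 0 n 1), s)) := by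
    rw [← hmain, List.map_map]
    rfl
  rw [this]
  show _ = (doubling es).map (fun s => (_, PySem.Set.ofList s))
  apply List.map_congr_left
  intro s hs
  have hsn : s.Nodup := (mem_doubling_sublist es s hs).nodup hnd
  have hofl : PySem.Set.ofList s = s := PySem.Set.ofList_eq_self_of_nodup s hsn
  rw [hofl]
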